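-- pv_equiv track=rewrite | github.com/Alunos-ADS-1S18-1R18/PIM-2-Semestre-ADS | users/Admin.py | verificar_codigo
-- ===== SOURCE A (Python) =====
-- def verificar_codigo(codigo):
--     # Etapa 1: Somar os valores ASCII dos caracteres
--     soma_ascii = sum(ord(c) for c in codigo)
--
--     # Etapa 2: Multiplicar pela posição do primeiro número encontrado
--     pos_num = next((i for i, c in enumerate(codigo) if c.isdigit()), 1)
--     resultado = soma_ascii * pos_num
--
--     # Etapa 3: Subtrair o produto da quantidade de letras maiúsculas vezes 42
--     letras_maiusculas = sum(1 for c in codigo if c.isupper())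
--     resultado -= letras_maiusculas * 42
--
--     # Etapa 4: Adicionar o valor da última letra convertida para número (A=1, B=2, ..., Z=26)
--     letras = [c for c in codigo if c.isalpha()]
--     if letras:
--         ultima_letra = letras[-1]
--         resultado += ord(ultima_letra.upper()) - 64
--
--     # Etapa 5: Aplicar módulo 97 e verificar se o resultado é igual a um valor fixo (ex: 73)
--     return resultado % 97 == 73
-- ===== SOURCE B (Python) =====
-- def _summary(s):
--     # (ascii_sum, first_digit_offset or None, uppercase_count, last_letter or None, length)
--     n = len(s)
--     if n == 0:
--         return (0, None, 0, None, 0)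
--     if n == 1:
--         return (ord(s), 0 if s.isdigit() else None,
--                 1 if s.isupper() else 0, s if s.isalpha() else None, 1)
--     m = n // 2
--     ls, lf, lu, ll, ln = _summary(s[:m])
--     rs, rf, ru, rl, rn = _summary(s[m:])
--     return (ls + rs,
--             lf if lf is not None else (ln + rf if rf is not None else None),
--             lu + ru,
--             rl if rl is not None else ll,
--             ln + rn)
--
-- def verificar_codigo(codigo):
--     soma, fd, ups, last, _ = _summary(codigo)
--     resultado = soma * (fd if fd is not None else 1) - ups * 42
--     if last is not None:
--         resultado += ord(last.upper()) - 64
--     return resultado % 97 == 73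
-- ===== Notes on version B (the rewrite author's own statement) =====
-- stated objective: alternative
-- what changed: A makes four separate left-to-right scans of the string; B computes a five-component summary (ascii sum, first-digit offset, uppercase count, last letter, length) by divide-and-conquer, recursively splitting the string in half and merging the two half-summaries with an associative combine, then applies the checksum arithmetic to the root summary.
import Mathlib
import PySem

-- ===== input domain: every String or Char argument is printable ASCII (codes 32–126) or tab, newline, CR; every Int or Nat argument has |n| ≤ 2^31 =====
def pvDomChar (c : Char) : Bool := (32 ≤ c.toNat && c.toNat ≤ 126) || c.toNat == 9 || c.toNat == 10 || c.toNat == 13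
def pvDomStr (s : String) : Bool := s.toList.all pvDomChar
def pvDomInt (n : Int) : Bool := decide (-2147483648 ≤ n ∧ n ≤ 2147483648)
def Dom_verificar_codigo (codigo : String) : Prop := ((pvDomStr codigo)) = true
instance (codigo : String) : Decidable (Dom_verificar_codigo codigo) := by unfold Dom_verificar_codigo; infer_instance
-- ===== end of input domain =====

-- B replaces A's four sequential scans with a divide-and-conquer summary (split in half,
-- merge half-summaries); same results, alternative structure (no speed claim).

-- ===== PORT A =====
-- next((i for i, c in enumerate(codigo) if c.isdigit()), 1)
def pvFirstDigitPos (cs : List Char) (i : Nat) : Int :=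
  match cs with
  | [] => 1
  | c :: t => if PySem.Chars.isdigit c then (i : Int) else pvFirstDigitPos t (i + 1)

def verificar_codigo (codigo : String) : Bool :=
  let cs := codigo.toList
  let soma_ascii : Int := (cs.map (fun c => (c.toNat : Int))).sum
  let pos_num : Int := pvFirstDigitPos cs 0
  let resultado := soma_ascii * pos_num
  let letras_maiusculas : Int := ((cs.filter PySem.Chars.isupper).length : Int)
  let resultado := resultado - letras_maiusculas * 42
  let letras := cs.filter PySem.Chars.isalpha
  let resultado :=
    match PySem.List.pyGet? letras (-1) with
    | some ultima => resultado + ((PySem.Chars.upperChar ultima).toNat : Int) - 64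
    | none => resultado
  decide (PySem.Int.mod resultado 97 = 73)

-- ===== PORT B =====
-- merge of two half-summaries (the 5-tuple arithmetic of Source B's _summary combine step)
def pvComb (L R : Int × Option Int × Int × Option Char × Int) :
    Int × Option Int × Int × Option Char × Int :=
  (L.1 + R.1,
   (match L.2.1 with
    | some p => some p
    | none => (match R.2.1 with
               | some q => some (L.2.2.2.2 + q)
               | none => none)),
   L.2.2.1 + R.2.2.1,
   (match R.2.2.2.1 with
    | some c => some c
    | none => L.2.2.2.1),
   L.2.2.2.2 + R.2.2.2.2)

-- _summary of Source B: divide-and-conquer over the half-split of the string;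
-- returns (ascii sum, first-digit offset?, uppercase count, last letter?, length)
def pvSumm (cs : List Char) : Int × Option Int × Int × Option Char × Int :=
  match cs with
  | [] => (0, none, 0, none, 0)
  | [c] => ((c.toNat : Int),
            (if PySem.Chars.isdigit c then some 0 else none),
            (if PySem.Chars.isupper c then 1 else 0),
            (if PySem.Chars.isalpha c then some c else none), 1)
  | c1 :: c2 :: rest =>
      let m := (c1 :: c2 :: rest).length / 2
      pvComb (pvSumm ((c1 :: c2 :: rest).take m)) (pvSumm ((c1 :: c2 :: rest).drop m))
  termination_by cs.length
  decreasing_by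
    · simp [List.length_take]; omega
    · simp; omega

def verificar_codigo_alt (codigo : String) : Bool :=
  let r := pvSumm codigo.toList
  let resultado := r.1 * (match r.2.1 with | some p => p | none => 1) - r.2.2.1 * 42
  let resultado :=
    match r.2.2.2.1 with
    | some c => resultado + ((PySem.Chars.upperChar c).toNat : Int) - 64
    | none => resultado
  decide (PySem.Int.mod resultado 97 = 73)

-- ===== PRECONDITION & SPEC =====
def Spec_verificar_codigo (codigo : String) (out : Bool) : Prop := out = verificar_codigo_alt codigo
instance (codigo : String) (out : Bool) : Decidable (Spec_verificar_codigo codigo out) := by unfold Spec_verificar_codigo; infer_instance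

-- ===== CLAIM (what is proved, stated in full; the proofs are below) =====
def Claim_equal_verificar_codigo : Prop := ∀ (codigo : String), Dom_verificar_codigo codigo → Spec_verificar_codigo codigo (verificar_codigo codigo)

-- ===== LEMMAS AND PROOFS =====

-- closed list-homomorphism forms of the five summary components
def pvOrdSum (cs : List Char) : Int := (cs.map (fun c => (c.toNat : Int))).sum

def pvFd : List Char → Option Int
  | [] => none
  | c :: t => if PySem.Chars.isdigit c then some 0 else (pvFd t).map (· + 1)

def pvUp (cs : List Char) : Int := ((cs.filter PySem.Chars.isupper).length : Int)

def pvLastA (cs : List Char) : Option Char := (cs.filter PySem.Chars.isalpha).getLast?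

def pvHom (cs : List Char) : Int × Option Int × Int × Option Char × Int :=
  (pvOrdSum cs, pvFd cs, pvUp cs, pvLastA cs, (cs.length : Int))

theorem pvFd_append (a b : List Char) :
    pvFd (a ++ b) =
      (match pvFd a with
       | some p => some p
       | none => (pvFd b).map (· + (a.length : Int))) := by
  induction a with
  | nil => cases h : pvFd b <;> simp [pvFd, h]
  | cons c t ih =>
    by_cases h : PySem.Chars.isdigit c = true
    · simp [pvFd, h]
    · simp only [List.cons_append, pvFd, h, Bool.false_eq_true, ite_false, ih]
      cases ht : pvFd t with
      | some p => simp
      | none =>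
        cases hb : pvFd b with
        | none => simp
        | some q =>
          simp only [Option.map_some, List.length_cons]
          congr 1
          push_cast
          omega

theorem pvLastA_append (a b : List Char) :
    pvLastA (a ++ b) =
      (match pvLastA b with
       | some c => some c
       | none => pvLastA a) := by
  unfold pvLastA
  rw [List.filter_append, List.getLast?_append]
  cases (b.filter PySem.Chars.isalpha).getLast? <;> simp [Option.or]

theorem pvHom_append (a b : List Char) :
    pvHom (a ++ b) = pvComb (pvHom a) (pvHom b) := by
  unfold pvHom pvComb
  refine Prod.ext ?_ (Prod.ext ?_ (Prod.ext ?_ (Prod.ext ?_ ?_)))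
  · simp [pvOrdSum]
  · simp only [pvFd_append]
    cases ha : pvFd a with
    | some p => simp
    | none =>
      cases hb : pvFd b with
      | none => simp
      | some q => simp only [Option.map_some]; congr 1; omega
  · simp only [pvUp, List.filter_append, List.length_append]
    push_cast; ring
  · simp only [pvLastA_append]
  · simp only [List.length_append]
    push_cast; ring

theorem pvSumm_eq (cs : List Char) : pvSumm cs = pvHom cs := by
  induction cs using pvSumm.induct with
  | case1 => simp [pvSumm, pvHom, pvOrdSum, pvFd, pvUp, pvLastA]
  | case2 c =>
    simp only [pvSumm, pvHom, pvOrdSum, pvFd, pvUp, pvLastA, List.map, List.sum_cons,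
      List.sum_nil, List.filter, List.length]
    by_cases hu : PySem.Chars.isupper c = true <;>
      by_cases ha : PySem.Chars.isalpha c = true <;>
        simp [hu, ha, List.getLast?]
  | case3 c1 c2 rest m ih1 ih2 =>
    have hm : m = (c1 :: c2 :: rest).length / 2 := rfl
    rw [pvSumm, ← hm, ih1, ih2, ← pvHom_append, List.take_append_drop]

theorem pvFirstDigitPos_eq (cs : List Char) (i : Nat) :
    pvFirstDigitPos cs i = ((pvFd cs).map (· + (i : Int))).getD 1 := by
  induction cs generalizing i with
  | nil => simp [pvFirstDigitPos, pvFd]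
  | cons c t ih =>
    by_cases h : PySem.Chars.isdigit c = true
    · simp [pvFirstDigitPos, pvFd, h]
    · simp only [pvFirstDigitPos, pvFd, h, Bool.false_eq_true, ite_false, ih]
      cases ht : pvFd t with
      | none => simp
      | some p =>
        simp only [Option.map_some, Option.getD_some]
        push_cast
        ring

theorem pvPyGet_neg_one (l : List Char) : PySem.List.pyGet? l (-1) = l.getLast? := by
  cases l with
  | nil => simp [PySem.List.pyGet?, PySem.List.pyIdx?]
  | cons a t =>
    simp [PySem.List.pyGet?, PySem.List.pyIdx?, List.getLast?_eq_getElem?]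

-- ===== VERDICT (by name: the statement is the Claim_ definition above) =====
theorem verificar_codigo_spec : Claim_equal_verificar_codigo := by
  intro codigo _
  unfold Spec_verificar_codigo verificar_codigo verificar_codigo_alt
  simp only [pvSumm_eq, pvHom, pvFirstDigitPos_eq, pvPyGet_neg_one, pvOrdSum, pvUp, pvLastA]
  cases pvFd codigo.toList <;> simp
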